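-- pv_equiv track=rewrite | github.com/LinInFal/-math-logic-and-algorithms-theory | lab2/lab4.py | calc_fdnf
-- ===== SOURCE A (Python) =====
-- def calc_fdnf(dnf):
--     fdnf = []
--     for conj in dnf:
--         x_values = [1, -1] if conj[0] == 0 else [conj[0]]
--         y_values = [1, -1] if conj[1] == 0 else [conj[1]]
--         z_values = [1, -1] if conj[2] == 0 else [conj[2]]
--         for x in x_values:
--             for y in y_values:
--                 for z in z_values:
--                     new_conj = [x, y, z]
--                     new_conj_is_present = False
--                     # Проверка на наличие такого же конъюнкта в списке fdnf
--                     for c in fdnf: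
--                         if c == new_conj:
--                             new_conj_is_present = True
--                             break
--                     if not new_conj_is_present:
--                         fdnf.append(new_conj)
--     return fdnf
-- ===== SOURCE B (Python) =====
-- from itertools import product
--
-- def covers(c, t):
--     # conjunct c produces triple t in the expansion
--     return all((t[k] in (1, -1)) if c[k] == 0 else t[k] == c[k] for k in range(3))
--
-- def calc_fdnf(dnf):
--     # A triple is emitted for a conjunct iff no earlier conjunct covers it:
--     # no dedup against the output list at all, only a predicate on the input prefix.
--     out, prev = [], []
--     for conj in dnf:
--         opts = [[1, -1] if v == 0 else [v] for v in conj[:3]]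
--         out += [list(t) for t in product(*opts) if not any(covers(c, t) for c in prev)]
--         prev.append(conj)
--     return out
-- ===== Notes on version B (the rewrite author's own statement) =====
-- stated objective: alternative
-- what changed: B eliminates the dedup-against-the-output scan entirely: a triple is emitted for conjunct i iff no earlier input conjunct covers it (a coverage predicate over the input prefix, with the per-conjunct expansion built by itertools.product), instead of A's membership scan of the growing result list for every generated triple.
import Mathlib
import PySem

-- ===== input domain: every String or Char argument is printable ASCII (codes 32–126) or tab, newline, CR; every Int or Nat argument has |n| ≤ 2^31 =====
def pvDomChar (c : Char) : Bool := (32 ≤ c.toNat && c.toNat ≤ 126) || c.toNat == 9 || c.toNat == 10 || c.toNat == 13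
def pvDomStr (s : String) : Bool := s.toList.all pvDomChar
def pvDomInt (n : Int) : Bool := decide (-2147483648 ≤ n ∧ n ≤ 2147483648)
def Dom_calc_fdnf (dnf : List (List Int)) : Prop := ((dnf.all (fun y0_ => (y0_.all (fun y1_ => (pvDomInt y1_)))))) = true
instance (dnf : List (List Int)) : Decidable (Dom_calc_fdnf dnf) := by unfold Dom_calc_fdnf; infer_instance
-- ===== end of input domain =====

-- B removes the dedup-against-output scan entirely: a triple is emitted for a conjunct iff no
-- EARLIER INPUT conjunct covers it (a predicate on the input prefix), instead of A's membership
-- scan of the growing result list ('alternative' objective, not claimed faster).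

-- ===== PORT A =====
def calc_fdnf (dnf : List (List Int)) : List (List Int) :=
  dnf.foldl (fun fdnf conj =>
    let c0 := (PySem.List.pyGet? conj 0).getD 0
    let c1 := (PySem.List.pyGet? conj 1).getD 0
    let c2 := (PySem.List.pyGet? conj 2).getD 0
    let xv : List Int := if c0 == 0 then [1, -1] else [c0]
    let yv : List Int := if c1 == 0 then [1, -1] else [c1]
    let zv : List Int := if c2 == 0 then [1, -1] else [c2]
    xv.foldl (fun f1 x =>
      yv.foldl (fun f2 y =>
        zv.foldl (fun f3 z =>
          let nc := [x, y, z]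
          -- linear membership scan over the accumulated fdnf
          if f3.any (fun c => c == nc) then f3 else f3 ++ [nc]) f2) f1) fdnf) []

-- ===== PORT B =====
-- covers(c, t): conjunct c produces triple t in the expansion
def pvCovers (c t : List Int) : Bool :=
  (List.range 3).all fun k =>
    if ((PySem.List.pyGet? c (k : Int)).getD 0) == 0 then
      (((PySem.List.pyGet? t (k : Int)).getD 0) == 1 || ((PySem.List.pyGet? t (k : Int)).getD 0) == -1)
    else ((PySem.List.pyGet? t (k : Int)).getD 0) == ((PySem.List.pyGet? c (k : Int)).getD 0)

-- itertools.product over a list of option lists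
def pvProduct : List (List Int) → List (List Int)
  | [] => [[]]
  | l :: ls => l.flatMap fun x => (pvProduct ls).map fun t => x :: t

def calc_fdnf_alt (dnf : List (List Int)) : List (List Int) :=
  (dnf.foldl (fun (s : List (List Int) × List (List Int)) conj =>
      let opts := (PySem.List.slice conj none (some 3)).map
        (fun v : Int => if v == 0 then [1, -1] else [v])
      (s.1 ++ (pvProduct opts).filter (fun t => !(s.2.any (fun c => pvCovers c t))),
       s.2 ++ [conj]))
    ([], [])).1

-- ===== PRECONDITION & SPEC =====
-- Pre_ excludes exactly the inputs on which Python A raises IndexError: a conjunct shorter than 3.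
def Pre_calc_fdnf (dnf : List (List Int)) : Prop := ∀ conj ∈ dnf, 3 ≤ conj.length
instance (dnf : List (List Int)) : Decidable (Pre_calc_fdnf dnf) := by unfold Pre_calc_fdnf; infer_instance
def pvWitness_calc_fdnf : List (List Int) := [[1, 0, -1], [0, 0, 1]]

def Spec_calc_fdnf (dnf : List (List Int)) (out : List (List Int)) : Prop := out = calc_fdnf_alt dnf
instance (dnf : List (List Int)) (out : List (List Int)) : Decidable (Spec_calc_fdnf dnf out) := by unfold Spec_calc_fdnf; infer_instance

-- ===== CLAIM (what is proved, stated in full; the proofs are below) =====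
def Claim_equal_calc_fdnf : Prop := ∀ (dnf : List (List Int)), Dom_calc_fdnf dnf → Pre_calc_fdnf dnf → Spec_calc_fdnf dnf (calc_fdnf dnf)

-- ===== LEMMAS AND PROOFS =====

-- the value list of one coordinate, and the triple expansion of (a, b, d)
def pvVals (v : Int) : List Int := if v == 0 then [1, -1] else [v]

def pvTriple (a b d : Int) : List (List Int) :=
  (pvVals a).flatMap fun x => (pvVals b).flatMap fun y => (pvVals d).map fun z => [x, y, z]

-- the expansion of a conjunct, read through Python indexing (only used on length >= 3)
def pvProdOf (c : List Int) : List (List Int) :=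
  pvTriple ((PySem.List.pyGet? c 0).getD 0) ((PySem.List.pyGet? c 1).getD 0)
           ((PySem.List.pyGet? c 2).getD 0)

-- A's and B's per-conjunct steps, named for the induction
def pvAStep (fdnf : List (List Int)) (conj : List Int) : List (List Int) :=
  let c0 := (PySem.List.pyGet? conj 0).getD 0
  let c1 := (PySem.List.pyGet? conj 1).getD 0
  let c2 := (PySem.List.pyGet? conj 2).getD 0
  let xv : List Int := if c0 == 0 then [1, -1] else [c0]
  let yv : List Int := if c1 == 0 then [1, -1] else [c1]
  let zv : List Int := if c2 == 0 then [1, -1] else [c2]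
  xv.foldl (fun f1 x =>
    yv.foldl (fun f2 y =>
      zv.foldl (fun f3 z =>
        let nc := [x, y, z]
        if f3.any (fun c => c == nc) then f3 else f3 ++ [nc]) f2) f1) fdnf

def pvBStep (s : List (List Int) × List (List Int)) (conj : List Int) :
    List (List Int) × List (List Int) :=
  let opts := (PySem.List.slice conj none (some 3)).map
    (fun v : Int => if v == 0 then [1, -1] else [v])
  (s.1 ++ (pvProduct opts).filter (fun t => !(s.2.any (fun c => pvCovers c t))),
   s.2 ++ [conj])

lemma calc_fdnf_eq_fold (dnf : List (List Int)) : calc_fdnf dnf = dnf.foldl pvAStep [] := rfl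

lemma calc_fdnf_alt_eq_fold (dnf : List (List Int)) :
    calc_fdnf_alt dnf = (dnf.foldl pvBStep ([], [])).1 := rfl

lemma any_beq_iff (l : List (List Int)) (t : List Int) :
    (l.any (fun c => c == t) = true) ↔ t ∈ l := by
  simp [List.any_eq_true, beq_iff_eq]

lemma mem_pvVals (v x : Int) : x ∈ pvVals v ↔ (if v = 0 then x = 1 ∨ x = -1 else x = v) := by
  unfold pvVals; split_ifs <;> simp_all

lemma mem_pvTriple (a b d x y z : Int) :
    [x, y, z] ∈ pvTriple a b d ↔ (x ∈ pvVals a ∧ y ∈ pvVals b ∧ z ∈ pvVals d) := by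
  unfold pvTriple
  simp only [List.mem_flatMap, List.mem_map]
  constructor
  · rintro ⟨x', hx, y', hy, z', hz, h⟩
    simp only [List.cons.injEq, and_true] at h
    obtain ⟨rfl, rfl, rfl⟩ := h
    exact ⟨hx, hy, hz⟩
  · rintro ⟨hx, hy, hz⟩; exact ⟨x, hx, y, hy, z, hz, rfl⟩

lemma shape_pvTriple (a b d : Int) (t : List Int) (h : t ∈ pvTriple a b d) :
    ∃ x y z : Int, t = [x, y, z] := by
  unfold pvTriple at h
  simp only [List.mem_flatMap, List.mem_map] at h
  obtain ⟨x, _, y, _, z, _, ht⟩ := h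
  exact ⟨x, y, z, ht.symm⟩

lemma nodup_pvTriple (a b d : Int) : (pvTriple a b d).Nodup := by
  unfold pvTriple pvVals
  split_ifs <;> simp_all [List.flatMap]

lemma nodup_pvProdOf (c : List Int) : (pvProdOf c).Nodup := nodup_pvTriple _ _ _

lemma len3_shape (c : List Int) (h : 3 ≤ c.length) : ∃ a b d r, c = a :: b :: d :: r := by
  match c with
  | a :: b :: d :: r => exact ⟨a, b, d, r, rfl⟩
  | [] | [_] | [_, _] => simp at h

-- Python indexing on an explicitly long enough list
lemma pg0 (u : Int) (l : List Int) : (PySem.List.pyGet? (u :: l) 0).getD 0 = u := by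
  rw [(by norm_num : (0 : Int) = ((0 : Nat) : Int)), PySem.List.pyGet?_natCast]; rfl

lemma pg1 (u v : Int) (l : List Int) : (PySem.List.pyGet? (u :: v :: l) 1).getD 0 = v := by
  rw [(by norm_num : (1 : Int) = ((1 : Nat) : Int)), PySem.List.pyGet?_natCast]; rfl

lemma pg2 (u v w : Int) (l : List Int) : (PySem.List.pyGet? (u :: v :: w :: l) 2).getD 0 = w := by
  rw [(by norm_num : (2 : Int) = ((2 : Nat) : Int)), PySem.List.pyGet?_natCast]; rfl

lemma pvProdOf_cons (a b d : Int) (r : List Int) :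
    pvProdOf (a :: b :: d :: r) = pvTriple a b d := by
  unfold pvProdOf
  rw [pg0, pg1, pg2]

-- A's dedup fold over a duplicate-free list appends exactly the fresh elements
lemma foldl_dedup (l : List (List Int)) (hl : l.Nodup) :
    ∀ f : List (List Int),
      l.foldl (fun f3 nc => if f3.any (fun c => c == nc) then f3 else f3 ++ [nc]) f
        = f ++ l.filter (fun nc => !(f.any (fun c => c == nc))) := by
  induction l with
  | nil => intro f; simp
  | cons a l ih =>
    rw [List.nodup_cons] at hl
    intro f
    rw [List.foldl_cons]
    by_cases hmem : (f.any (fun c => c == a)) = true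
    · rw [if_pos hmem, ih hl.2, List.filter_cons]
      simp [hmem]
    · rw [if_neg hmem, ih hl.2]
      have hc : ∀ x ∈ l, (!((f ++ [a]).any (fun c => c == x))) = (!(f.any (fun c => c == x))) := by
        intro x hx
        have hxa : a ≠ x := by rintro rfl; exact hl.1 hx
        simp [List.any_append, beq_iff_eq, hxa]
      rw [List.filter_congr hc, List.filter_cons]
      simp [hmem]

-- nested foldl over a flatMap
lemma foldl_flatMap {α β γ : Type} (f : β → α → β) (g : γ → List α) :
    ∀ (l : List γ) (a : β),
      (l.flatMap g).foldl f a = l.foldl (fun a x => (g x).foldl f a) a := by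
  intro l
  induction l with
  | nil => intro a; rfl
  | cons x xs ih => intro a; simp [List.flatMap_cons, List.foldl_append, ih]

-- A's step appends the fresh part of the conjunct's expansion
lemma aStep_eq (f : List (List Int)) (conj : List Int) :
    pvAStep f conj = f ++ (pvProdOf conj).filter (fun nc => !(f.any (fun c => c == nc))) := by
  rw [← foldl_dedup _ (nodup_pvProdOf conj) f]
  unfold pvAStep pvProdOf pvTriple pvVals
  simp only [foldl_flatMap, List.foldl_map]

-- covers on a length >= 3 conjunct is membership in its expansion
lemma covers_iff (a b d : Int) (rest : List Int) (x y z : Int) :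
    pvCovers (a :: b :: d :: rest) [x, y, z] = true ↔ [x, y, z] ∈ pvTriple a b d := by
  rw [mem_pvTriple]
  unfold pvCovers
  simp only [show List.range 3 = [0, 1, 2] from rfl, List.all_cons, List.all_nil, Bool.and_true,
    Nat.cast_ofNat, Nat.cast_zero, Nat.cast_one, pg0, pg1, pg2, mem_pvVals]
  simp [Bool.and_eq_true, Bool.or_eq_true, beq_iff_eq]

lemma flatMap_single {α β : Type} (l : List α) (f : α → β) :
    (l.flatMap fun x => [f x]) = l.map f := by
  induction l with
  | nil => rfl
  | cons a l ih => simp [ih]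

-- B's per-conjunct product is the triple expansion
lemma product_opts (a b d : Int) (rest : List Int) :
    pvProduct ((PySem.List.slice (a :: b :: d :: rest) none (some 3)).map
      (fun v : Int => if v == 0 then [1, -1] else [v])) = pvTriple a b d := by
  have h3 : PySem.List.slice (a :: b :: d :: rest) none (some 3) = [a, b, d] := by
    rw [(by norm_num : (3 : Int) = ((3 : Nat) : Int)), PySem.List.slice_to_natCast]
    rfl
  rw [h3]
  show pvProduct [pvVals a, pvVals b, pvVals d] = pvTriple a b d
  simp [pvProduct, pvTriple, List.map_flatMap, List.map_map, flatMap_single, Function.comp_def]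

-- the main invariant induction
set_option maxHeartbeats 1600000 in
lemma main_fold : ∀ (rest : List (List Int)) (f prev : List (List Int)),
    (∀ c ∈ rest, 3 ≤ c.length) → (∀ c ∈ prev, 3 ≤ c.length) →
    (∀ t, ((f.any (fun c => c == t)) = true ↔ ∃ p ∈ prev, t ∈ pvProdOf p)) →
    rest.foldl pvAStep f = (rest.foldl pvBStep (f, prev)).1 := by
  intro rest
  induction rest with
  | nil => intro f prev _ _ _; rfl
  | cons c cs ih =>
    intro f prev hrest hprev hinv
    obtain ⟨a, b, d, r, rfl⟩ := len3_shape c (hrest c (by simp))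
    have hcov : ∀ t ∈ pvProdOf (a :: b :: d :: r),
        (!(f.any (fun c' => c' == t))) = (!(prev.any (fun p => pvCovers p t))) := by
      intro t ht
      rw [pvProdOf_cons] at ht
      obtain ⟨x, y, z, rfl⟩ := shape_pvTriple _ _ _ _ ht
      have h1 : (f.any (fun c' => c' == [x, y, z]) = true) ↔
          (prev.any (fun p => pvCovers p [x, y, z]) = true) := by
        rw [hinv, List.any_eq_true]
        constructor
        · rintro ⟨p, hp, hmem⟩
          obtain ⟨a', b', d', r', rfl⟩ := len3_shape p (hprev p hp)
          rw [pvProdOf_cons] at hmem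
          exact ⟨_, hp, (covers_iff _ _ _ _ _ _ _).mpr hmem⟩
        · rintro ⟨p, hp, hcv⟩
          obtain ⟨a', b', d', r', rfl⟩ := len3_shape p (hprev p hp)
          refine ⟨_, hp, ?_⟩
          rw [pvProdOf_cons]
          exact (covers_iff _ _ _ _ _ _ _).mp hcv
      cases hfa : (f.any (fun c' => c' == [x, y, z])) <;>
        cases hpa : (prev.any (fun p => pvCovers p [x, y, z])) <;> simp_all
    have hstepB : pvBStep (f, prev) (a :: b :: d :: r)
        = (pvAStep f (a :: b :: d :: r), prev ++ [a :: b :: d :: r]) := by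
      show (f ++ (pvProduct ((PySem.List.slice (a :: b :: d :: r) none (some 3)).map
          (fun v : Int => if v == 0 then [1, -1] else [v]))).filter
            (fun t => !(prev.any (fun c => pvCovers c t))), prev ++ [a :: b :: d :: r])
        = (pvAStep f (a :: b :: d :: r), prev ++ [a :: b :: d :: r])
      rw [aStep_eq, product_opts, ← pvProdOf_cons a b d r, ← List.filter_congr hcov]
    rw [List.foldl_cons, List.foldl_cons, hstepB]
    apply ih
    · intro c' hc'; exact hrest c' (by simp [hc'])
    · intro c' hc'
      rcases List.mem_append.mp hc' with h | h
      · exact hprev c' h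
      · simp at h; subst h; simp
    · intro t
      rw [aStep_eq]
      constructor
      · intro h
        rw [any_beq_iff, List.mem_append] at h
        rcases h with h | h
        · obtain ⟨p, hp, hm⟩ := (hinv t).mp ((any_beq_iff f t).mpr h)
          exact ⟨p, by simp [hp], hm⟩
        · exact ⟨a :: b :: d :: r, by simp, (List.mem_filter.mp h).1⟩
      · rintro ⟨p, hp, hm⟩
        rw [any_beq_iff, List.mem_append]
        rcases List.mem_append.mp hp with h | h
        · exact Or.inl ((any_beq_iff f t).mp ((hinv t).mpr ⟨p, h, hm⟩))
        · simp at h; subst h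
          by_cases hf : (f.any (fun c' => c' == t)) = true
          · exact Or.inl ((any_beq_iff f t).mp hf)
          · refine Or.inr (List.mem_filter.mpr ⟨hm, ?_⟩)
            simp [hf]

-- ===== VERDICT (by name: the statement is the Claim_ definition above) =====
theorem calc_fdnf_spec : Claim_equal_calc_fdnf := by
  intro dnf _ hpre
  unfold Spec_calc_fdnf
  rw [calc_fdnf_eq_fold, calc_fdnf_alt_eq_fold]
  exact main_fold dnf [] [] hpre (by simp) (by simp)
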